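-- pv_equiv track=rewrite | github.com/Blueprime-C/engpy | AI/helpers.py | guage
-- ===== SOURCE A (Python) =====
-- def guage(string):
--     prev = ''
--     res = 0; add = 0; string = string.replace(' ',''); brac = 0
--     for z in string:
--
--         if (prev in ('','+','-','*','/') and z.isnumeric()) or brac:
--             continue
--
--         add += 1
--         res += add
--     return res
-- ===== SOURCE B (Python) =====
-- def guage(string):
--     k = sum(1 for c in string.replace(' ', '') if not c.isnumeric())
--     return k * (k + 1) // 2
-- ===== Notes on version B (the rewrite author's own statement) =====
-- stated objective: simpler
-- what changed: Replaces the running-accumulator loop (whose prev/brac state is dead code) by a count of non-numeric characters followed by the closed-form triangular number k*(k+1)//2.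
import Mathlib
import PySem

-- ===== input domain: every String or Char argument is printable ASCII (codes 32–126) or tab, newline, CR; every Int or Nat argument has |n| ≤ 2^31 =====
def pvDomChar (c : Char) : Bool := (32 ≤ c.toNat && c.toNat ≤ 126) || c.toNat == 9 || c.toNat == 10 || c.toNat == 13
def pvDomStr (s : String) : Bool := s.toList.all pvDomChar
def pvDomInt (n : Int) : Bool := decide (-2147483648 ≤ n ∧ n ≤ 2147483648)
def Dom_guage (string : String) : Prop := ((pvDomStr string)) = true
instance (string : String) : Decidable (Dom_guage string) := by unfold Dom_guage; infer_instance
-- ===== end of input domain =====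

-- B replaces A's running-accumulator loop (whose prev/brac state is dead code) by a
-- count of the non-numeric characters followed by the closed form k*(k+1)//2; simpler.
-- z.isnumeric() is ported as PySem.Chars.isdigit: on the printable-ASCII domain the two agree ('0'-'9').

-- ===== PORT A =====
-- one iteration of A's loop; state = (prev, res, add, brac)
def guageStep (st : String × Int × Int × Int) (z : Char) : String × Int × Int × Int :=
  if (["", "+", "-", "*", "/"].contains st.1 && PySem.Chars.isdigit z) || st.2.2.2 ≠ 0 then
    st                                                   -- continue
  else
    (st.1, st.2.1 + (st.2.2.1 + 1), st.2.2.1 + 1, st.2.2.2)  -- add += 1; res += add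

def guage (string : String) : Int :=
  -- prev = ''; res = 0; add = 0; string = string.replace(' ',''); brac = 0
  let s := PySem.Str.replace string " " ""
  (s.toList.foldl guageStep ("", 0, 0, 0)).2.1

-- ===== PORT B =====
def guage_alt (string : String) : Int :=
  -- k = sum(1 for c in string.replace(' ','') if not c.isnumeric()); return k*(k+1)//2
  let k : Int := ((PySem.Str.replace string " " "").toList.filter
      (fun c => ¬ PySem.Chars.isdigit c)).length
  PySem.Int.floordiv (k * (k + 1)) 2

-- ===== PRECONDITION & SPEC =====
def Spec_guage (string : String) (out : Int) : Prop := out = guage_alt string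
instance (string : String) (out : Int) : Decidable (Spec_guage string out) := by unfold Spec_guage; infer_instance

-- ===== CLAIM (what is proved, stated in full; the proofs are below) =====
def Claim_equal_guage : Prop := ∀ (string : String), Dom_guage string → Spec_guage string (guage string)

-- ===== LEMMAS AND PROOFS =====

theorem guageStep_digit (res add : Int) (z : Char) (hz : PySem.Chars.isdigit z = true) :
    guageStep ("", res, add, 0) z = ("", res, add, 0) := by
  simp [guageStep, hz]

theorem guageStep_nondigit (res add : Int) (z : Char) (hz : ¬ PySem.Chars.isdigit z = true) :
    guageStep ("", res, add, 0) z = ("", res + (add + 1), add + 1, 0) := by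
  simp [guageStep, hz]

-- Invariant of A's loop: prev stays "", brac stays 0, and the result is res plus a
-- shifted triangular sum over the non-digit characters (stated times 2 to avoid division).
theorem guage_loop_inv (l : List Char) : ∀ (res add : Int),
    2 * (l.foldl guageStep ("", res, add, 0)).2.1
    = 2 * res + 2 * ((l.filter (fun c => ¬ PySem.Chars.isdigit c)).length : Int) * add
      + ((l.filter (fun c => ¬ PySem.Chars.isdigit c)).length : Int)
        * (((l.filter (fun c => ¬ PySem.Chars.isdigit c)).length : Int) + 1) := by
  induction l with
  | nil => intro res add; simp
  | cons z l ih =>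
    intro res add
    by_cases hz : PySem.Chars.isdigit z = true
    · rw [List.foldl_cons, guageStep_digit _ _ _ hz, ih]
      simp [hz]
    · rw [List.foldl_cons, guageStep_nondigit _ _ _ hz, ih,
        List.filter_cons_of_pos (by simpa using hz)]
      simp only [List.length_cons]
      push_cast
      ring

-- ===== VERDICT (by name: the statement is the Claim_ definition above) =====
theorem guage_spec : Claim_equal_guage := by
  intro string _
  unfold Spec_guage guage guage_alt
  have h := guage_loop_inv (PySem.Str.replace string " " "").toList 0 0
  set k : Int := (((PySem.Str.replace string " " "").toList.filter
      (fun c => ¬ PySem.Chars.isdigit c)).length : Int) with hk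
  rw [PySem.Int.floordiv_eq_ediv_of_pos (by norm_num)]
  simp only at h ⊢
  omega
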